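-- pv_equiv track=rewrite | github.com/chelseakomlo/DES | utils.py | _with_parity
-- ===== SOURCE A (Python) =====
-- def _with_parity(key):
--   final_key = ""
--   while len(key) != 0:
--     block = key[0:7]
--     parity = 0 if (block.count('1') % 2 == 0) else 1
--     final_key += block + str(parity)
--     key = key[7:]
--   return final_key
-- ===== SOURCE B (Python) =====
-- def _with_parity(key):
--     out = []
--     ones = 0
--     blk = 0
--     for ch in key:
--         out.append(ch)
--         if ch == '1':
--             ones += 1
--         blk += 1
--         if blk == 7:
--             out.append('1' if ones % 2 == 1 else '0')
--             ones = 0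
--             blk = 0
--     if blk != 0:
--         out.append('1' if ones % 2 == 1 else '0')
--     return ''.join(out)
-- ===== Notes on version B (the rewrite author's own statement) =====
-- stated objective: faster
-- what changed: single left-to-right pass over the characters with running ones/block-length counters, collected in a list joined once at the end, instead of A's while loop that repeatedly slices off 7-char blocks, recounts '1's per block and rebuilds the string by concatenation
import Mathlib
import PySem

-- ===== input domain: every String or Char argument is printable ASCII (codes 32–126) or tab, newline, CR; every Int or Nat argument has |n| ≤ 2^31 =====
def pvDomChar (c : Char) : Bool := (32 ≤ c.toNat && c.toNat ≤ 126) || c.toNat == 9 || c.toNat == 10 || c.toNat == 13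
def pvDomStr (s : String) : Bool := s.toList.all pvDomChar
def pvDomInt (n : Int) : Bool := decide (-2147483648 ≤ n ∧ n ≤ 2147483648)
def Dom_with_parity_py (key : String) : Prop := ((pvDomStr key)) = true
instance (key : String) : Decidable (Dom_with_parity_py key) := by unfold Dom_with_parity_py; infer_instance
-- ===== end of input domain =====

-- B replaces A's 7-char slice-and-concatenate while loop by a single per-character pass
-- with running ones/block-length counters and one final flush (objective: faster single pass, no repeated slicing/concatenation).


-- ===== PORT A =====
-- A's while loop: block = key[0:7]; parity = 0/1 from block.count('1') % 2;
-- final_key += block + str(parity); key = key[7:]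
def withParityGo (finalKey : List Char) (key : List Char) : List Char :=
  if key.length = 0 then finalKey
  else
    let block := PySem.List.slice key (some 0) (some 7)
    let parity : Int := if PySem.Chars.count block ['1'] % 2 = 0 then 0 else 1
    withParityGo (finalKey ++ block ++ (PySem.Int.toStr parity).toList)
      (PySem.List.slice key (some 7) none)
  termination_by key.length
  decreasing_by
    rw [PySem.List.slice_from key (by norm_num)]
    simp
    omega

def with_parity_py (key : String) : String := String.ofList (withParityGo [] key.toList)

-- ===== PORT B =====
-- one step of Source B's for loop; state st = (out, ones, blk)
def altStep (st : List Char × Nat × Nat) (ch : Char) : List Char × Nat × Nat :=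
  let out := st.1 ++ [ch]
  let ones := if ch == '1' then st.2.1 + 1 else st.2.1
  let blk := st.2.2 + 1
  if blk == 7 then (out ++ [if ones % 2 == 1 then '1' else '0'], 0, 0) else (out, ones, blk)

-- Source B: fold the loop over the characters, then flush a parity bit for a nonempty last block
def with_parity_py_alt (key : String) : String :=
  let st := key.toList.foldl altStep ([], 0, 0)
  String.ofList (if st.2.2 ≠ 0 then st.1 ++ [if st.2.1 % 2 == 1 then '1' else '0'] else st.1)

-- ===== PRECONDITION & SPEC =====
def Spec_with_parity_py (key : String) (out : String) : Prop := out = with_parity_py_alt key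
instance (key : String) (out : String) : Decidable (Spec_with_parity_py key out) := by unfold Spec_with_parity_py; infer_instance

-- ===== CLAIM (what is proved, stated in full; the proofs are below) =====
def Claim_equal_with_parity_py : Prop := ∀ (key : String), Dom_with_parity_py key → Spec_with_parity_py key (with_parity_py key)

-- ===== LEMMAS AND PROOFS =====

-- the parity bit appended after a block whose '1'-count is k
def pbit (k : Nat) : Char := if k % 2 == 1 then '1' else '0'

theorem count_go_one (cs : List Char) : ∀ (fuel acc : Nat), cs.length ≤ fuel →
    PySem.Chars.count.go ['1'] fuel cs acc = acc + cs.count '1' := by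
  induction cs with
  | nil => intro fuel acc _; cases fuel <;> simp [PySem.Chars.count.go]
  | cons a t ih =>
    intro fuel acc h
    cases fuel with
    | zero => simp at h
    | succ m =>
      by_cases ha : a = '1'
      · subst ha
        rw [PySem.Chars.count.go]
        simp [List.isPrefixOf, ih m (acc + 1) (by simpa using h)]
        omega
      · have ha' : ¬ ('1' = a) := fun hh => ha hh.symm
        rw [PySem.Chars.count.go]
        simp [List.isPrefixOf, ha, ha', ih m acc (by simpa using h), List.count_cons]

theorem count_one (cs : List Char) : PySem.Chars.count cs ['1'] = cs.count '1' := by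
  simp [PySem.Chars.count, count_go_one cs cs.length 0 le_rfl]

theorem foldl_altStep_run (xs : List Char) : ∀ (out : List Char) (ones blk : Nat),
    blk < 7 → blk + xs.length ≤ 7 →
    xs.foldl altStep (out, ones, blk) =
      if blk + xs.length = 7 then (out ++ xs ++ [pbit (ones + xs.count '1')], 0, 0)
      else (out ++ xs, ones + xs.count '1', blk + xs.length) := by
  induction xs with
  | nil => intro out ones blk h1 _; simp; omega
  | cons x t ih =>
    intro out ones blk h1 h2
    have hlen : (x :: t).length = t.length + 1 := rfl
    rw [hlen] at h2
    simp only [List.foldl_cons, altStep]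
    by_cases h7 : blk + 1 = 7
    · have ht : t = [] := by
        cases t with
        | nil => rfl
        | cons y s => simp at hlen h2 ⊢; omega
      subst ht
      have hb : (blk + 1 == 7) = true := by simp [h7]
      rw [hb]
      have hcond : blk + [x].length = 7 := by simp; omega
      rw [if_pos hcond]
      by_cases hx : x = '1' <;> simp [hx, pbit, List.count_cons]
    · have hb : (blk + 1 == 7) = false := by simp; omega
      rw [hb]
      simp only [Bool.false_eq_true, if_false]
      rw [ih (out ++ [x]) (if x == '1' then ones + 1 else ones) (blk + 1) (by omega) (by omega)]
      have hcnt : (if x == '1' then ones + 1 else ones) + t.count '1'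
          = ones + (x :: t).count '1' := by
        by_cases hx : x = '1' <;> simp [hx, List.count_cons] <;> omega
      rw [hcnt]
      by_cases hc : blk + 1 + t.length = 7
      · have hcond : blk + (x :: t).length = 7 := by rw [hlen]; omega
        rw [if_pos hc, if_pos hcond]
        simp [List.append_assoc]
      · have hcond : ¬ blk + (x :: t).length = 7 := by rw [hlen]; omega
        rw [if_neg hc, if_neg hcond]
        refine Prod.ext ?_ (Prod.ext ?_ ?_) <;> simp [hlen] <;> omega

theorem main_run (n : Nat) : ∀ (key acc : List Char), key.length ≤ n →
    withParityGo acc key =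
      (let st := key.foldl altStep (acc, 0, 0)
       if st.2.2 ≠ 0 then st.1 ++ [if st.2.1 % 2 == 1 then '1' else '0'] else st.1) := by
  induction n with
  | zero =>
    intro key acc h
    have hk : key = [] := by cases key <;> simp_all
    subst hk
    rw [withParityGo]
    simp only [List.length_nil, if_pos rfl, List.foldl_nil]
    simp
  | succ m ih =>
    intro key acc h
    by_cases hnil : key = []
    · subst hnil; rw [withParityGo]; simp
    · have hne : key.length ≠ 0 := by simpa using hnil
      rw [withParityGo]
      simp only [hne, if_false]
      have hslice0 : PySem.List.slice key (some 0) (some 7) = key.take 7 := by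
        rw [PySem.List.slice_zero_start, PySem.List.slice_to key (by norm_num)]
        simp only [show Int.toNat 7 = 7 from rfl]
      have hslice7 : PySem.List.slice key (some 7) none = key.drop 7 := by
        rw [PySem.List.slice_from key (by norm_num)]
        simp only [show Int.toNat 7 = 7 from rfl]
      rw [hslice0, hslice7, count_one]
      have hsplit : key.take 7 ++ key.drop 7 = key := List.take_append_drop 7 key
      conv_rhs => rw [← hsplit]
      rw [List.foldl_append]
      by_cases hlen : 7 ≤ key.length
      · have htl : (key.take 7).length = 7 := by simp; omega
        have hcond : 0 + (key.take 7).length = 7 := by rw [htl]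
        rw [foldl_altStep_run (key.take 7) acc 0 0 (by omega) (by omega), if_pos hcond]
        rw [ih (key.drop 7) _ (by simp; omega)]
        have hbit : (PySem.Int.toStr (if (key.take 7).count '1' % 2 = 0 then (0:Int) else 1)).toList
            = [pbit (0 + (key.take 7).count '1')] := by
          rcases Nat.mod_two_eq_zero_or_one ((key.take 7).count '1') with he | he <;>
            simp [he, pbit] <;> decide
        rw [hbit]
      · have htk : key.take 7 = key := List.take_of_length_le (by omega)
        have hdr : key.drop 7 = [] := List.drop_eq_nil_of_le (by omega)
        have hcond : ¬ 0 + key.length = 7 := by omega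
        rw [htk, hdr, foldl_altStep_run key acc 0 0 (by omega) (by omega),
            if_neg hcond, List.foldl_nil]
        have hbit : (PySem.Int.toStr (if key.count '1' % 2 = 0 then (0:Int) else 1)).toList
            = [pbit (0 + key.count '1')] := by
          rcases Nat.mod_two_eq_zero_or_one (key.count '1') with he | he <;>
            simp [he, pbit] <;> decide
        rw [hbit, withParityGo]
        simp [hne, pbit]

-- ===== VERDICT (by name: the statement is the Claim_ definition above) =====
theorem with_parity_py_spec : Claim_equal_with_parity_py := by
  intro key _
  unfold Spec_with_parity_py with_parity_py with_parity_py_alt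
  rw [main_run key.toList.length key.toList [] le_rfl]
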